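-- pv_equiv track=rewrite | github.com/scottshowers/xlr8 | backend/utils/intelligent_scoping.py | _select_best_table
-- ===== SOURCE A (Python) =====
-- from typing import Dict, List, Optional, Any, Tuple
--
-- def _select_best_table(tables: List[str], domain: str) -> Optional[str]:
--     """Select the best table for querying (prefer transaction/employee tables)."""
--     # Priority: employee tables > transaction tables > config tables
--     for table in tables:
--         t_lower = table.lower()
--         if 'employee' in t_lower or 'worker' in t_lower:
--             return table
--
--     for table in tables:
--         t_lower = table.lower()
--         if 'transaction' in t_lower or 'payroll' in t_lower:
--             return table
--
--     # Return first available
--     return tables[0] if tables else None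
-- ===== SOURCE B (Python) =====
-- def _select_best_table(tables, domain):
--     """Select the best table for querying (prefer transaction/employee tables)."""
--     first_employee = None
--     first_transaction = None
--     for table in tables:
--         t = table.lower()
--         if 'employee' in t or 'worker' in t:
--             first_employee = table
--             break  # employee always wins globally
--         if first_transaction is None and ('transaction' in t or 'payroll' in t):
--             first_transaction = table
--     if first_employee is not None:
--         return first_employee
--     if first_transaction is not None:
--         return first_transaction
--     return tables[0] if tables else None
-- ===== Notes on version B (the rewrite author's own statement) =====
-- stated objective: alternative
-- what changed: Replaced A's two sequential full scans (employee pass, then transaction pass) by one single pass that records write-once first-employee/first-transaction candidates and early-exits on an employee match.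
import Mathlib
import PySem

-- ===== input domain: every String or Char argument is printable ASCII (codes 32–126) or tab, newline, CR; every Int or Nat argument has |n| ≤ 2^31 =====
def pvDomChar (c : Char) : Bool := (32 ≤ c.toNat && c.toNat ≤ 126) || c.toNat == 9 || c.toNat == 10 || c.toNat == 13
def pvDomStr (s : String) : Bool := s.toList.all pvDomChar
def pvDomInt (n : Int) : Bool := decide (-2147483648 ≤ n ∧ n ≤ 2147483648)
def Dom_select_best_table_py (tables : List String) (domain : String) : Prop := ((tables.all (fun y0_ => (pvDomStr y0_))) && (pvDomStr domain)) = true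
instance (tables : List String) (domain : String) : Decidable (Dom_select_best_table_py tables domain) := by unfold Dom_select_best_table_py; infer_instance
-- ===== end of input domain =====

-- B replaces A's two sequential full scans by one single pass with write-once candidates and early exit; same results (alternative decomposition).

-- ===== PORT A =====
def pvEmpHit (tl : String) : Bool :=
  PySem.Str.isIn "employee" tl || PySem.Str.isIn "worker" tl

def pvTxHit (tl : String) : Bool :=
  PySem.Str.isIn "transaction" tl || PySem.Str.isIn "payroll" tl

-- first loop of A: return first table whose lowercase contains employee/worker
def pvLoopEmp : List String → Option String
  | [] => none
  | t :: rest =>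
      let tl := PySem.Str.lower t
      if pvEmpHit tl then some t else pvLoopEmp rest

-- second loop of A: return first table whose lowercase contains transaction/payroll
def pvLoopTx : List String → Option String
  | [] => none
  | t :: rest =>
      let tl := PySem.Str.lower t
      if pvTxHit tl then some t else pvLoopTx rest

def select_best_table_py (tables : List String) (domain : String) : Option String :=
  match pvLoopEmp tables with
  | some t => some t
  | none =>
    match pvLoopTx tables with
    | some t => some t
    | none => tables.head?   -- tables[0] if tables else None

-- ===== PORT B =====
-- single pass: early-exits with the employee match, carrying write-once first_transaction
def pvScan : List String → Option String → Option String × Option String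
  | [], ftx => (none, ftx)
  | t :: rest, ftx =>
      let tl := PySem.Str.lower t
      if pvEmpHit tl then (some t, ftx)
      else pvScan rest (if ftx.isNone && pvTxHit tl then some t else ftx)

def select_best_table_py_alt (tables : List String) (domain : String) : Option String :=
  match pvScan tables none with
  | (some e, _) => some e
  | (none, some tx) => some tx
  | (none, none) => tables.head?

-- ===== PRECONDITION & SPEC =====
def Spec_select_best_table_py (tables : List String) (domain : String) (out : Option String) : Prop := out = select_best_table_py_alt tables domain
instance (tables : List String) (domain : String) (out : Option String) : Decidable (Spec_select_best_table_py tables domain out) := by unfold Spec_select_best_table_py; infer_instance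

-- ===== CLAIM (what is proved, stated in full; the proofs are below) =====
def Claim_equal_select_best_table_py : Prop := ∀ (tables : List String) (domain : String), Dom_select_best_table_py tables domain → Spec_select_best_table_py tables domain (select_best_table_py tables domain)

-- ===== LEMMAS AND PROOFS =====
-- invariant of the single pass: first component is A's first loop; when that loop
-- fails, the second component is the accumulator if already set, otherwise A's second loop
theorem pvScan_inv (tables : List String) (ftx : Option String) :
    (pvScan tables ftx).1 = pvLoopEmp tables ∧
    (pvLoopEmp tables = none →
      (pvScan tables ftx).2 = (match ftx with | some x => some x | none => pvLoopTx tables)) := by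
  induction tables generalizing ftx with
  | nil => cases ftx <;> simp [pvScan, pvLoopEmp, pvLoopTx]
  | cons t rest ih =>
    by_cases h : pvEmpHit (PySem.Str.lower t)
    · simp [pvScan, pvLoopEmp, h]
    · constructor
      · simpa [pvScan, pvLoopEmp, h] using (ih _).1
      · intro hnone
        have hrest : pvLoopEmp rest = none := by
          simpa [pvLoopEmp, h] using hnone
        cases ftx with
        | some x => simpa [pvScan, h] using (ih (some x)).2 hrest
        | none =>
          by_cases ht : pvTxHit (PySem.Str.lower t)
          · simpa [pvScan, h, ht, pvLoopTx] using (ih (some t)).2 hrest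
          · simpa [pvScan, h, ht, pvLoopTx] using (ih none).2 hrest

-- ===== VERDICT (by name: the statement is the Claim_ definition above) =====
theorem select_best_table_py_spec : Claim_equal_select_best_table_py := by
  intro tables domain _
  unfold Spec_select_best_table_py select_best_table_py select_best_table_py_alt
  obtain ⟨h1, h2⟩ := pvScan_inv tables none
  cases he : pvLoopEmp tables with
  | some e =>
    rcases hp : pvScan tables none with ⟨f, s⟩
    rw [hp] at h1; simp at h1; rw [he] at h1; subst h1
    simp
  | none =>
    have h2' := h2 he
    rcases hp : pvScan tables none with ⟨f, s⟩
    rw [hp] at h1 h2'; simp at h1 h2'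
    rw [he] at h1; subst h1
    cases ht : pvLoopTx tables with
    | some tx => rw [ht] at h2'; subst h2'; simp
    | none => rw [ht] at h2'; subst h2'; simp
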